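-- pv_equiv track=rewrite | github.com/thunder775/coding_challenges | venv/day_1.py | diceGame
-- ===== SOURCE A (Python) =====
-- def diceGame(rolls):
--     sum = 0;
--     for [dice1, dice2] in rolls:
--         if dice2 == dice1:
--             sum = 0
--         else:
--             sum += dice2 + dice1
--     return sum
-- ===== SOURCE B (Python) =====
-- def diceGame(rolls):
--     last_reset = -1
--     for i, (d1, d2) in enumerate(rolls):
--         if d1 == d2:
--             last_reset = i
--     total = 0
--     for d1, d2 in rolls[last_reset + 1:]:
--         total += d1 + d2
--     return total
-- ===== Notes on version B (the rewrite author's own statement) =====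
-- stated objective: alternative
-- what changed: Instead of accumulating with resets, B finds the index of the last double in one pass and then sums d1+d2 over the suffix strictly after it.
import Mathlib
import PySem

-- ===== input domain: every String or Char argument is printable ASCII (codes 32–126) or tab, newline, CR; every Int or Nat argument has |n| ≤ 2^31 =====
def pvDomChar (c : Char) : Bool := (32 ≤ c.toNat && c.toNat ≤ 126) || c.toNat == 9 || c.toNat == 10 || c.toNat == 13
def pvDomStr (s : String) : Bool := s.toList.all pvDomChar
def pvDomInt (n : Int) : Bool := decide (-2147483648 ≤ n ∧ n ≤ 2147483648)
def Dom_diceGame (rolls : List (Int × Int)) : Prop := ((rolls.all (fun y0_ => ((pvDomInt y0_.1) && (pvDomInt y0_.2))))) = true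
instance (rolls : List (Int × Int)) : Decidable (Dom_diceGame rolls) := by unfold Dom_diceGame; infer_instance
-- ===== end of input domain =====

-- B replaces A's reset-accumulator with "find last double, sum the suffix after it" (alternative decomposition, same cost).

-- ===== PORT A =====
def diceGame (rolls : List (Int × Int)) : Int :=
  rolls.foldl (fun sum p => if p.2 == p.1 then 0 else sum + p.2 + p.1) 0

-- ===== PORT B =====
-- last_reset pass of Source B: fold over enumerate, remembering the index of the last double
def diceGameLastReset (rolls : List (Int × Int)) : Int :=
  (PySem.List.enumerate rolls 0).foldl
    (fun last_reset ip => if ip.2.1 == ip.2.2 then ip.1 else last_reset) (-1)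

def diceGame_alt (rolls : List (Int × Int)) : Int :=
  (PySem.List.slice rolls (some (diceGameLastReset rolls + 1)) none).foldl
    (fun total p => total + (p.1 + p.2)) 0

-- ===== PRECONDITION & SPEC =====
def Spec_diceGame (rolls : List (Int × Int)) (out : Int) : Prop := out = diceGame_alt rolls
instance (rolls : List (Int × Int)) (out : Int) : Decidable (Spec_diceGame rolls out) := by unfold Spec_diceGame; infer_instance

-- ===== CLAIM (what is proved, stated in full; the proofs are below) =====
def Claim_equal_diceGame : Prop := ∀ (rolls : List (Int × Int)), Dom_diceGame rolls → Spec_diceGame rolls (diceGame rolls)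

-- ===== LEMMAS AND PROOFS =====

theorem lastReset_append (xs : List (Int × Int)) (x : Int × Int) :
    diceGameLastReset (xs ++ [x]) =
      (if x.1 == x.2 then (xs.length : Int) else diceGameLastReset xs) := by
  simp [diceGameLastReset, PySem.List.enumerate_append, List.foldl_append,
    PySem.List.enumerate_cons]

theorem lastReset_bounds (xs : List (Int × Int)) :
    -1 ≤ diceGameLastReset xs ∧ diceGameLastReset xs < (xs.length : Int) := by
  induction xs using List.reverseRecOn with
  | nil => simp [diceGameLastReset]
  | append_singleton xs x ih =>
    rw [lastReset_append]
    rcases ih with ⟨h1, h2⟩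
    simp only [List.length_append, List.length_cons, List.length_nil, Nat.cast_add, Nat.cast_one]
    split <;> omega

theorem diceGame_append (xs : List (Int × Int)) (x : Int × Int) :
    diceGame (xs ++ [x]) = if x.2 == x.1 then 0 else diceGame xs + x.2 + x.1 := by
  simp [diceGame, List.foldl_append]

theorem alt_eq (xs : List (Int × Int)) : diceGame xs = diceGame_alt xs := by
  induction xs using List.reverseRecOn with
  | nil => simp [diceGame, diceGame_alt, diceGameLastReset, PySem.List.slice]
  | append_singleton xs x ih =>
    have hb := lastReset_bounds xs
    rw [diceGame_append]
    unfold diceGame_alt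
    rw [lastReset_append]
    by_cases h : (x.1 == x.2) = true
    · have h' : (x.2 == x.1) = true := by simp only [beq_iff_eq] at h ⊢; omega
      rw [if_pos h, if_pos h',
        PySem.List.slice_from _ (by positivity : (0:Int) ≤ (xs.length : Int) + 1)]
      have ht : ((xs.length : Int) + 1).toNat = xs.length + 1 := by omega
      rw [ht, List.drop_eq_nil_of_le (by simp)]
      rfl
    · have h' : ¬ ((x.2 == x.1) = true) := by simp only [beq_iff_eq] at h ⊢; omega
      have h0 : (0 : Int) ≤ diceGameLastReset xs + 1 := by omega
      rw [if_neg h, if_neg h', PySem.List.slice_from _ h0]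
      have hle : (diceGameLastReset xs + 1).toNat ≤ xs.length := by omega
      rw [List.drop_append_of_le_length hle, List.foldl_append, ih]
      unfold diceGame_alt
      rw [PySem.List.slice_from _ h0]
      simp [List.foldl_cons, List.foldl_nil]
      ring

-- ===== VERDICT (by name: the statement is the Claim_ definition above) =====
theorem diceGame_spec : Claim_equal_diceGame := by
  intro rolls _
  unfold Spec_diceGame
  exact alt_eq rolls
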